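-- pv_equiv track=rewrite | github.com/nastyh/LeetCode | Basic Data Structures/1370_Increasing_Decreasing_String.py | sortString_sorting
-- ===== SOURCE A (Python) =====
-- from collections import Counter
--
-- def sortString_sorting(s):
--     d = Counter(s)
--     result = []
--     smallest = True
--     while d:
--         keys = [key for key in d]
--         keys = sorted(keys) if smallest else sorted(keys, reverse = True)
--         smallest = not smallest
--         for key in keys:
--             result.append(key)
--             if d[key] == 1:
--                 del d[key]
--             else:
--                 d[key] -= 1
--     return ''.join(result)
-- ===== SOURCE B (Python) =====
-- from collections import Counter
--
-- def sortString_sorting(s):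
--     cnt = Counter(s)
--     chars = sorted(cnt)
--     m = max(cnt.values(), default=0)
--     out = []
--     for i in range(m):
--         wave = [c for c in chars if cnt[c] > i]
--         out.extend(wave if i % 2 == 0 else reversed(wave))
--     return ''.join(out)
-- ===== Notes on version B (the rewrite author's own statement) =====
-- stated objective: simpler
-- what changed: Instead of A's while-loop that re-reads, re-sorts and destructively shrinks the Counter every pass (deleting or decrementing each key), B sorts the distinct characters once and runs a fixed range(max_count) loop that selects each pass's characters with a count>i threshold, mutating nothing.
import Mathlib
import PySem

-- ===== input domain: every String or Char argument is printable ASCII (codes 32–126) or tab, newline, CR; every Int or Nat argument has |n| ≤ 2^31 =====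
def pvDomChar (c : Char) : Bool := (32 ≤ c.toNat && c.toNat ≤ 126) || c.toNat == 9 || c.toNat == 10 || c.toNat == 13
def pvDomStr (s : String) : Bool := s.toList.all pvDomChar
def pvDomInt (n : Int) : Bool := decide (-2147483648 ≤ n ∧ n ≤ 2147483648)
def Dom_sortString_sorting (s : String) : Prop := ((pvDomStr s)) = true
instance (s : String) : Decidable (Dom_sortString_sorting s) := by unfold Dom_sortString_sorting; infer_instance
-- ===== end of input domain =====

-- B replaces A's repeatedly re-sorted, destructively shrinking Counter by one sort of the
-- distinct characters and a fixed-range pass loop with a count>i threshold (objective: simpler).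

-- ===== PORT A =====
-- one body of A's inner for-loop: the key was appended; delete it when its count is 1, else decrement
def pvDecStep (d : PySem.Dict Char Int) (key : Char) : PySem.Dict Char Int :=
  if d.getD key 0 == 1 then d.erase key else d.modify key 0 (· - 1)

-- A's `while d:` loop; the fuel only makes the recursion total (it is never exhausted:
-- the number of passes is the maximal multiplicity, at most len(s) < the fuel supplied)
def pvLoopA : Nat → PySem.Dict Char Int → Bool → List Char → List Char
  | 0, _, _, result => result
  | fuel+1, d, smallest, result =>
    if d.size = 0 then result
    else
      let keys := PySem.List.sorted d.keys (fun k => k) (!smallest)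
      let st := keys.foldl (fun st key => (st.1 ++ [key], pvDecStep st.2 key)) (result, d)
      pvLoopA fuel st.2 (!smallest) st.1

def sortString_sorting (s : String) : String :=
  String.ofList (pvLoopA (s.toList.length + 1) (PySem.Dict.counter s.toList) true [])

-- ===== PORT B =====
def sortString_sorting_alt (s : String) : String :=
  let cnt := PySem.Dict.counter s.toList
  let chars := PySem.List.sorted cnt.keys (fun k => k)
  let m := PySem.List.maxD cnt.values (fun v => v) 0
  let out := (PySem.List.pyRange 0 m).foldl (fun out i =>
    let wave := chars.filter (fun c => decide (i < cnt.getD c 0))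
    out ++ (if PySem.Int.mod i 2 == 0 then wave else wave.reverse)) []
  String.ofList out

-- ===== PRECONDITION & SPEC =====
def Spec_sortString_sorting (s : String) (out : String) : Prop := out = sortString_sorting_alt s
instance (s : String) (out : String) : Decidable (Spec_sortString_sorting s out) := by unfold Spec_sortString_sorting; infer_instance

-- ===== CLAIM (what is proved, stated in full; the proofs are below) =====
def Claim_equal_sortString_sorting : Prop := ∀ (s : String), Dom_sortString_sorting s → Spec_sortString_sorting s (sortString_sorting s)

-- ===== LEMMAS AND PROOFS =====

-- abstract description of the alternating waves both programs produce:
-- n passes over the fixed char list K, pass j keeping the chars with f c > j,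
-- ascending when the parity flag p is true, descending otherwise
def pvWaves : Nat → (Char → Int) → List Char → Bool → List Char
  | 0, _, _, _ => []
  | n+1, f, K, p =>
    (if p then K.filter (fun c => decide (0 < f c)) else (K.filter (fun c => decide (0 < f c))).reverse)
      ++ pvWaves n (fun c => f c - 1) K (!p)

theorem pvWaves_nil (n : Nat) (f : Char → Int) (p : Bool) : pvWaves n f [] p = [] := by
  induction n generalizing f p with
  | zero => rfl
  | succ n ih => simp [pvWaves, ih]

theorem pvWaves_congr (n : Nat) (f g : Char → Int) (K : List Char) (p : Bool)
    (h : ∀ c ∈ K, f c = g c) : pvWaves n f K p = pvWaves n g K p := by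
  induction n generalizing f g p with
  | zero => rfl
  | succ n ih =>
    simp only [pvWaves]
    have h1 : K.filter (fun c => decide (0 < f c)) = K.filter (fun c => decide (0 < g c)) :=
      List.filter_congr (fun c hc => by simp [h c hc])
    rw [h1, ih _ _ _ (by intro c hc; rw [h c hc])]

theorem pvWaves_sub_filter (n : Nat) (f : Char → Int) (K : List Char) (p : Bool) (q : Char → Bool)
    (h : ∀ c ∈ K, q c = false → f c ≤ 0) :
    pvWaves n f (K.filter q) p = pvWaves n f K p := by
  induction n generalizing f p with
  | zero => rfl
  | succ n ih =>
    simp only [pvWaves, List.filter_filter]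
    rw [List.filter_congr (q := fun c => decide (0 < f c))
      (by intro c hc; cases hq : q c with
          | true => simp
          | false => have := h c hc hq; simp; omega),
      ih _ _ (by intro c hc hq; have := h c hc hq; omega)]

theorem pvWaves_zero_of_le (n : Nat) (f : Char → Int) (K : List Char) (p : Bool)
    (h : ∀ c ∈ K, f c ≤ 0) : pvWaves n f K p = [] := by
  induction n generalizing f p with
  | zero => rfl
  | succ n ih =>
    have hf : K.filter (fun c => decide (0 < f c)) = [] := by
      rw [List.filter_eq_nil_iff]; intro c hc; have := h c hc; simp; omega
    rw [pvWaves, hf, ih _ _ (by intro c hc; have := h c hc; omega)]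
    simp

theorem pvWaves_fuel (n : Nat) : ∀ (m : Nat) (f : Char → Int) (K : List Char) (p : Bool),
    n ≤ m → (∀ c ∈ K, f c ≤ (n : Int)) → pvWaves m f K p = pvWaves n f K p := by
  induction n with
  | zero =>
    intro m f K p _ h
    rw [pvWaves_zero_of_le m f K p (by exact_mod_cast h)]; rfl
  | succ n ih =>
    intro m f K p hm h
    obtain ⟨m', rfl⟩ : ∃ m', m = m' + 1 := ⟨m - 1, by omega⟩
    simp only [pvWaves]
    rw [ih m' _ _ _ (by omega) (by intro c hc; have := h c hc; omega)]

theorem pvWaves_range (n : Nat) (f : Char → Int) (K : List Char) (p : Bool) :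
    pvWaves n f K p = (List.range n).flatMap (fun (i : Nat) =>
      let w := K.filter (fun c => decide ((i : Int) < f c))
      if (decide (i % 2 = 0)) = p then w else w.reverse) := by
  induction n generalizing f p with
  | zero => rfl
  | succ n ih =>
    rw [List.range_succ_eq_map, List.flatMap_cons, List.flatMap_map]
    simp only [pvWaves]
    rw [ih (fun c => f c - 1) (!p)]
    congr 1
    · simp only [Nat.cast_zero]
      cases p <;> simp
    · congr 1
      funext i
      simp only []
      have hpred : K.filter (fun c => decide ((i:Int) < f c - 1)) = K.filter (fun c => decide (((i+1 : Nat) : Int) < f c)) := by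
        apply List.filter_congr; intro c _; simp; constructor <;> (intro; omega)
      rw [hpred]
      exact if_congr (by cases p <;> simp <;> omega) rfl rfl

-- the inner for-loop's fold splits into its two independent components
theorem pvPass_split (ks : List Char) : ∀ (acc : List Char) (d : PySem.Dict Char Int),
    ks.foldl (fun st key => (st.1 ++ [key], pvDecStep st.2 key)) (acc, d)
      = (acc ++ ks, ks.foldl pvDecStep d) := by
  induction ks with
  | nil => intro acc d; simp [List.foldl]
  | cons k rest ih => intro acc d; simp [List.foldl, ih]

-- facts about PySem.Dict.erase (the prelude carries no erase lemmas)
theorem pv_find_erase (l : List (Char × Int)) (k c : Char) (h : c ≠ k) :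
   (l.filter (fun p => !p.1 == k)).find? (fun p => p.1 == c) = l.find? (fun p => p.1 == c) := by
  induction l with
  | nil => rfl
  | cons x xs ih =>
    by_cases hk : x.1 = k
    · have hq : (!x.1 == k) = false := by simp [hk]
      have hb : (x.1 == c) = false := by simp [hk]; exact fun e => h (e ▸ rfl)
      rw [List.filter_cons_of_neg (by simp [hq]), List.find?_cons_of_neg (by simp [hb]), ih]
    · have hq : (!x.1 == k) = true := by simp [hk]
      rw [List.filter_cons_of_pos (by simp [hq])]
      by_cases hx : x.1 = c
      · rw [List.find?_cons_of_pos (by simp [hx]), List.find?_cons_of_pos (by simp [hx])]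
      · rw [List.find?_cons_of_neg (by simp [hx]), List.find?_cons_of_neg (by simp [hx]), ih]

theorem pv_getD_erase_of_ne (d : PySem.Dict Char Int) (k c : Char) (h : c ≠ k) (v : Int) :
    (d.erase k).getD c v = d.getD c v := by
  simp only [PySem.Dict.getD, PySem.Dict.get?, PySem.Dict.erase]
  rw [pv_find_erase _ _ _ h]

theorem pv_keys_erase (d : PySem.Dict Char Int) (k : Char) :
    (d.erase k).keys = d.keys.filter (fun x => !(x == k)) := by
  simp only [PySem.Dict.keys, PySem.Dict.erase]
  rw [List.filter_map]
  rfl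

-- the dictionary after one full pass: every processed count decremented (deletion = hitting 0)
theorem pvDecFold_getD (ks : List Char) : ∀ (d : PySem.Dict Char Int) (c : Char), ks.Nodup →
    (ks.foldl pvDecStep d).getD c 0 = if c ∈ ks then d.getD c 0 - 1 else d.getD c 0 := by
  induction ks with
  | nil => intro d c _; simp
  | cons k rest ih =>
    intro d c hnd
    rw [List.foldl_cons, ih _ _ hnd.of_cons]
    have hstep : ∀ j, j ≠ k → (pvDecStep d k).getD j 0 = d.getD j 0 := by
      intro j hj
      unfold pvDecStep
      split
      · exact pv_getD_erase_of_ne d k j hj 0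
      · rw [PySem.Dict.getD_modify]; simp [hj]
    have hself : (pvDecStep d k).getD k 0 = d.getD k 0 - 1 := by
      unfold pvDecStep
      split
      · rename_i hv
        simp only [beq_iff_eq] at hv
        rw [hv]
        simp only [PySem.Dict.getD, PySem.Dict.get?, PySem.Dict.erase]
        rw [List.find?_eq_none.2 (by intro p hp; simp at hp ⊢; intro e; exact absurd e hp.2)]
        rfl
      · rw [PySem.Dict.getD_modify]; simp
    by_cases hc : c = k
    · subst hc
      have : c ∉ rest := (List.nodup_cons.1 hnd).1
      simp [this, hself]
    · rw [hstep c hc]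
      by_cases hr : c ∈ rest <;> simp [hr, hc]

-- the keys surviving one full pass, in their original order
theorem pvDecFold_keys (ks : List Char) : ∀ (d : PySem.Dict Char Int), ks.Nodup →
    (∀ k ∈ ks, k ∈ d.keys) →
    (ks.foldl pvDecStep d).keys = d.keys.filter (fun c => !(ks.contains c && d.getD c 0 == 1)) := by
  induction ks with
  | nil => intro d _ _; simp
  | cons k rest ih =>
    intro d hnd hmem
    have hkd : k ∈ d.keys := hmem k (by simp)
    have hknr : k ∉ rest := (List.nodup_cons.1 hnd).1
    have hcont : d.contains k = true := (PySem.Dict.contains_iff_mem_keys d k).2 hkd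
    have hgetne : ∀ j, j ≠ k → (pvDecStep d k).getD j 0 = d.getD j 0 := by
      intro j hj
      unfold pvDecStep
      split
      · exact pv_getD_erase_of_ne d k j hj 0
      · rw [PySem.Dict.getD_modify]; simp [hj]
    have hkeys1 : ∀ j ∈ rest, j ∈ (pvDecStep d k).keys := by
      intro j hj
      have hjk : j ≠ k := fun e => hknr (e ▸ hj)
      unfold pvDecStep
      split
      · rw [pv_keys_erase]
        simp only [List.mem_filter]
        exact ⟨hmem j (by simp [hj]), by simp [hjk]⟩
      · rw [PySem.Dict.keys_modify, PySem.Dict.keys_insert_of_contains _ _ hcont]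
        exact hmem j (by simp [hj])
    rw [List.foldl_cons, ih _ hnd.of_cons hkeys1]
    by_cases hv : d.getD k 0 = 1
    · have hd1 : (pvDecStep d k).keys = d.keys.filter (fun x => !(x == k)) := by
        unfold pvDecStep; rw [if_pos (by simp [hv]), pv_keys_erase]
      rw [hd1, List.filter_filter]
      apply List.filter_congr
      intro c hc
      by_cases hck : c = k
      · subst hck
        simp [hv]
      · have h2 : (pvDecStep d k).getD c 0 = d.getD c 0 := hgetne c hck
        by_cases hr : c ∈ rest <;> by_cases hval : d.getD c 0 = 1 <;> simp [h2, hck, hr, hval]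
    · have hd1 : (pvDecStep d k).keys = d.keys := by
        unfold pvDecStep
        rw [if_neg (by simp [hv]), PySem.Dict.keys_modify, PySem.Dict.keys_insert_of_contains _ _ hcont]
      rw [hd1]
      apply List.filter_congr
      intro c hc
      by_cases hck : c = k
      · subst hck
        simp [hknr, hv]
      · have h2 : (pvDecStep d k).getD c 0 = d.getD c 0 := hgetne c hck
        by_cases hr : c ∈ rest <;> by_cases hval : d.getD c 0 = 1 <;> simp [h2, hck, hr, hval]

-- A's whole while-loop produces exactly the alternating waves of its current counter
theorem pvLoopA_eq (fuel : Nat) : ∀ (d : PySem.Dict Char Int) (p : Bool) (acc : List Char),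
    d.keys.Nodup → (∀ k ∈ d.keys, 1 ≤ d.getD k 0) →
    pvLoopA fuel d p acc = acc ++ pvWaves fuel (fun c => d.getD c 0) (PySem.List.sorted d.keys (fun k => k)) p := by
  induction fuel with
  | zero => intro d p acc _ _; simp [pvLoopA, pvWaves]
  | succ fuel ih =>
    intro d p acc hnd hval
    by_cases hsz : d.size = 0
    · have hitems : d.items = [] := List.length_eq_zero_iff.1 hsz
      have hkeys : d.keys = [] := by simp [PySem.Dict.keys, hitems]
      rw [hkeys]
      have hs : PySem.List.sorted ([] : List Char) (fun k => k) = [] := rfl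
      rw [hs, pvWaves_nil]
      simp [pvLoopA, hsz]
    · have hKperm : (PySem.List.sorted d.keys (fun k : Char => k)).Perm d.keys :=
        PySem.List.sorted_perm d.keys (fun k => k) false
      have hKnd : (PySem.List.sorted d.keys (fun k : Char => k)).Nodup := hKperm.nodup_iff.2 hnd
      have hKle : (PySem.List.sorted d.keys (fun k : Char => k)).Pairwise (· ≤ ·) := by
        have := PySem.List.sorted_pairwise d.keys (fun k : Char => k)
        simpa using this
      have hKlt : (PySem.List.sorted d.keys (fun k : Char => k)).Pairwise (· < ·) :=
        (hKle.and hKnd).imp (fun h => lt_of_le_of_ne h.1 h.2)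
      have hks : PySem.List.sorted d.keys (fun k : Char => k) (!p)
          = if p then PySem.List.sorted d.keys (fun k : Char => k)
            else (PySem.List.sorted d.keys (fun k : Char => k)).reverse := by
        cases p
        · simp only [Bool.not_false, if_neg Bool.false_ne_true]
          exact PySem.List.sorted_rev_eq_of_perm_of_pairwise_gt _ _ _
            ((List.reverse_perm _).trans hKperm)
            ((List.pairwise_reverse).2 hKlt)
        · rfl
      -- facts about the pass's key list
      set K := PySem.List.sorted d.keys (fun k : Char => k) with hK
      set ks := PySem.List.sorted d.keys (fun k : Char => k) (!p) with hks_def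
      have hksnd : ks.Nodup := by rw [hks_def]; exact (PySem.List.sorted_perm d.keys _ (!p)).nodup_iff.2 hnd
      have hksmem : ∀ c, c ∈ ks ↔ c ∈ d.keys := by
        intro c
        rw [hks_def]
        exact PySem.List.mem_sorted (xs := d.keys) (key := fun k : Char => k) (rev := !p) (x := c)
      have hksval : ∀ k ∈ ks, k ∈ d.keys := fun k hk => (hksmem k).1 hk
      -- the decremented dictionary
      have hd'keys : (ks.foldl pvDecStep d).keys = d.keys.filter (fun c => !(d.getD c 0 == 1)) := by
        rw [pvDecFold_keys ks d hksnd hksval]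
        apply List.filter_congr
        intro c hc
        have hmemks : c ∈ ks := (hksmem c).2 hc
        simp [hmemks]
      have hd'nd : (ks.foldl pvDecStep d).keys.Nodup := by rw [hd'keys]; exact hnd.filter _
      have hd'get : ∀ c ∈ d.keys, (ks.foldl pvDecStep d).getD c 0 = d.getD c 0 - 1 := by
        intro c hc
        rw [pvDecFold_getD ks d c hksnd, if_pos ((hksmem c).2 hc)]
      have hd'val : ∀ k ∈ (ks.foldl pvDecStep d).keys, 1 ≤ (ks.foldl pvDecStep d).getD k 0 := by
        intro c hc
        rw [hd'keys] at hc
        obtain ⟨hcd, hcp⟩ := List.mem_filter.1 hc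
        have h1 := hval c hcd
        have hne : d.getD c 0 ≠ 1 := by simpa using hcp
        rw [hd'get c hcd]
        omega
      -- unfold one iteration of the loop
      rw [pvLoopA, if_neg hsz]
      simp only []
      rw [pvPass_split, ih _ (!p) _ hd'nd hd'val]
      -- sorted keys of the decremented dictionary = filtered K
      have hK' : PySem.List.sorted (ks.foldl pvDecStep d).keys (fun k : Char => k)
          = K.filter (fun c => !(d.getD c 0 == 1)) := by
        rw [hd'keys]
        exact PySem.List.sorted_eq_of_perm_of_pairwise_lt _ _ _
          (hKperm.filter _) (hKlt.filter _)
      rw [hK']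
      have hw1 : pvWaves fuel (fun c => (ks.foldl pvDecStep d).getD c 0)
            (K.filter (fun c => !(d.getD c 0 == 1))) (!p)
          = pvWaves fuel (fun c => d.getD c 0 - 1) (K.filter (fun c => !(d.getD c 0 == 1))) (!p) := by
        apply pvWaves_congr
        intro c hc
        exact hd'get c (hKperm.mem_iff.1 (List.mem_of_mem_filter hc))
      have hw2 : pvWaves fuel (fun c => d.getD c 0 - 1) (K.filter (fun c => !(d.getD c 0 == 1))) (!p)
          = pvWaves fuel (fun c => d.getD c 0 - 1) K (!p) := by
        apply pvWaves_sub_filter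
        intro c _ hq
        have : d.getD c 0 = 1 := by simpa using hq
        omega
      rw [hw1, hw2]
      -- assemble the right-hand side
      have hfil : K.filter (fun c => decide (0 < d.getD c 0)) = K := by
        apply List.filter_eq_self.2
        intro c hc
        have := hval c (hKperm.mem_iff.1 hc)
        simp; omega
      simp only [pvWaves]
      rw [hfil, ← hks]
      cases p
      · rw [hks]
        simp
        simpa using hks
      · rw [hks]
        simp
        rw [hK]

theorem pv_main (s : String) : sortString_sorting s = sortString_sorting_alt s := by
  have hval : ∀ k ∈ (PySem.Dict.counter s.toList).keys, 1 ≤ (PySem.Dict.counter s.toList).getD k 0 := by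
    intro k hk
    rw [PySem.Dict.getD_counter]
    rw [PySem.Dict.keys_counter] at hk
    have hmem : k ∈ s.toList := (PySem.Set.mem_ofList s.toList k).1 hk
    have := List.count_pos_iff.2 hmem
    omega
  have hvals : (PySem.Dict.counter s.toList).values
      = (PySem.Set.ofList s.toList).map (fun k => (s.toList.count k : Int)) := by
    show ((PySem.Dict.counter s.toList).items).map (·.2) = _
    rw [PySem.Dict.items_counter, List.map_map]
    rfl
  set m := PySem.List.maxD (PySem.Dict.counter s.toList).values (fun v => v) 0 with hm
  have hm0 : 0 ≤ m ∧ m ≤ (s.toList.length : Int) := by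
    rcases hv : (PySem.Dict.counter s.toList).values with _ | ⟨v, vs⟩
    · rw [hm, hv, PySem.List.maxD_nil]
      exact ⟨le_refl 0, Int.natCast_nonneg _⟩
    · have hmem : m ∈ (PySem.Dict.counter s.toList).values := by
        rw [hm, hv]
        exact PySem.List.maxD_mem _ (fun v : Int => v) 0 (by simp)
      rw [hvals] at hmem
      obtain ⟨k, _, hk⟩ := List.mem_map.1 hmem
      refine ⟨?_, ?_⟩ <;> rw [← hk]
      · exact Int.natCast_nonneg _
      · exact_mod_cast List.count_le_length
  have hbound : ∀ c ∈ PySem.List.sorted (PySem.Dict.counter s.toList).keys (fun k => k),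
      (PySem.Dict.counter s.toList).getD c 0 ≤ m := by
    intro c hc
    have hck : c ∈ (PySem.Dict.counter s.toList).keys := (PySem.List.mem_sorted _ _ _ _).1 hc
    apply PySem.List.le_maxD_id
    rw [hvals, PySem.Dict.getD_counter]
    rw [PySem.Dict.keys_counter] at hck
    exact List.mem_map.2 ⟨c, hck, rfl⟩
  unfold sortString_sorting sortString_sorting_alt
  rw [pvLoopA_eq _ _ true [] (PySem.Dict.nodup_keys_counter s.toList) hval, List.nil_append]
  simp only []
  congr 1
  rw [PySem.List.foldl_append_eq_flatMap, List.nil_append]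
  rw [← hm]
  rw [show m = ((m.toNat : Nat) : Int) from (Int.toNat_of_nonneg hm0.1).symm,
    PySem.List.pyRange_zero_natCast, List.flatMap_map]
  rw [pvWaves_fuel m.toNat (s.toList.length + 1) _ _ true
    (by have := hm0.2; omega) (by intro c hc; rw [Int.toNat_of_nonneg hm0.1]; exact hbound c hc)]
  rw [pvWaves_range]
  congr 1
  funext i
  simp only []
  refine if_congr ?_ rfl rfl
  have : PySem.Int.mod (i : Int) 2 = ((i % 2 : Nat) : Int) := by
    exact_mod_cast PySem.Int.mod_natCast i 2
  rw [this]
  constructor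
  · intro h; simp at h ⊢; omega
  · intro h; simp at h ⊢; omega

-- ===== VERDICT (by name: the statement is the Claim_ definition above) =====
theorem sortString_sorting_spec : Claim_equal_sortString_sorting := by
  intro s _
  unfold Spec_sortString_sorting
  exact pv_main s
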